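-- pv_equiv track=rewrite | github.com/TingLu-MATH/Haar-state-project | Modules.py | comp_coeff
-- ===== SOURCE A (Python) =====
-- def comp_coeff(l1,l2):
--     l3=[]
--     l4=[]
--     l5=[]
--     c=1
--     n=len(l1)
--     for i in range(len(l2)):
--         if len(str(l2[i]))>4:
--             l3.append(i)
--         else:
--             l4.append(i)
--     for item in l4:
--         c=c*l2[item]
--     l5.append(c)
--     for item in l3:
--         c=1
--         for i in range(item):
--             if len(str(l2[i]))<4:
--                 c=c*l2[i]
--         c=c*l2[item]
--         l5.append(c)
--     return l1, l5
-- ===== SOURCE B (Python) =====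
-- def comp_coeff(l1, l2):
--     tot = 1        # product of all entries whose decimal string has length <= 4
--     pre = 1        # running product of entries seen so far with string length < 4
--     tail = []
--     for x in l2:
--         s = len(str(x))
--         if s > 4:
--             tail.append(pre * x)
--         else:
--             tot *= x
--         if s < 4:
--             pre *= x
--     return l1, [tot] + tail
-- ===== Notes on version B (the rewrite author's own statement) =====
-- stated objective: faster
-- what changed: Replaces A's second pass that rescans the whole prefix for every long-string index by a single pass maintaining a running product of short-string entries and a running product of all len(str)<=4 entries, emitting each long-index coefficient from the running prefix product.
import Mathlib
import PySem

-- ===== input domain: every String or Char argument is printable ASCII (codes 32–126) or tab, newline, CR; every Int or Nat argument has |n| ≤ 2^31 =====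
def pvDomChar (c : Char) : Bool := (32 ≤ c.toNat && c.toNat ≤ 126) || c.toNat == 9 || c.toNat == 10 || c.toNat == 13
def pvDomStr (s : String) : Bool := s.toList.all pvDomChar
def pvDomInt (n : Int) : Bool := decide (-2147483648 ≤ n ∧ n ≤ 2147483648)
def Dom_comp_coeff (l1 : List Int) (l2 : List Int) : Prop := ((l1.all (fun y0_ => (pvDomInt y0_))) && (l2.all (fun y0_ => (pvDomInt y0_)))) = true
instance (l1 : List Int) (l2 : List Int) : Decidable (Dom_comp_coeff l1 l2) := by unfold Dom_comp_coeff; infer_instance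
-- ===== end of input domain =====

-- B replaces A's quadratic per-index rescans by one pass with running products (O(n) vs O(n^2)).

-- len(str(x)) as an Int (shared by both ports)
def pvStrLen (x : Int) : Int := PySem.Str.len (PySem.Int.toStr x)

-- ===== PORT A =====
-- literal transliteration of A; indices produced by range(len(l2)) are always in range, so l2[i] is l2.getD i 0
def comp_coeff (l1 : List Int) (l2 : List Int) : List Int × List Int :=
  let n := l2.length
  let p := (List.range n).foldl
    (fun (st : List Nat × List Nat) i =>
      if 4 < pvStrLen (l2.getD i 0) then (st.1 ++ [i], st.2) else (st.1, st.2 ++ [i]))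
    ([], [])
  let l3 := p.1
  let l4 := p.2
  let c := l4.foldl (fun c item => c * l2.getD item 0) 1
  let l5 := [c]
  let l5 := l3.foldl
    (fun l5 item =>
      let c := (List.range item).foldl
        (fun c i => if pvStrLen (l2.getD i 0) < 4 then c * l2.getD i 0 else c) 1
      let c := c * l2.getD item 0
      l5 ++ [c])
    l5
  (l1, l5)

-- ===== PORT B =====
-- one pass over l2 with state (tot, pre, tail)
def pvStepB (st : Int × Int × List Int) (x : Int) : Int × Int × List Int :=
  let s := pvStrLen x
  let st1 := if 4 < s then (st.1, st.2.1, st.2.2 ++ [st.2.1 * x]) else (st.1 * x, st.2.1, st.2.2)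
  if s < 4 then (st1.1, st1.2.1 * x, st1.2.2) else st1

def comp_coeff_alt (l1 : List Int) (l2 : List Int) : List Int × List Int :=
  let st := l2.foldl pvStepB (1, 1, [])
  (l1, st.1 :: st.2.2)

-- ===== PRECONDITION & SPEC =====
def Spec_comp_coeff (l1 : List Int) (l2 : List Int) (out : List Int × List Int) : Prop := out = comp_coeff_alt l1 l2
instance (l1 : List Int) (l2 : List Int) (out : List Int × List Int) : Decidable (Spec_comp_coeff l1 l2 out) := by unfold Spec_comp_coeff; infer_instance

-- ===== CLAIM (what is proved, stated in full; the proofs are below) =====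
def Claim_equal_comp_coeff : Prop := ∀ (l1 : List Int) (l2 : List Int), Dom_comp_coeff l1 l2 → Spec_comp_coeff l1 l2 (comp_coeff l1 l2)

-- ===== LEMMAS AND PROOFS =====

-- closed forms (index based), used only by the proofs
def pvBigs (l : List Int) : List Nat := (List.range l.length).filter (fun i => 4 < pvStrLen (l.getD i 0))
def pvSp (l : List Int) : Int := (((List.range l.length).filter (fun i => ¬ 4 < pvStrLen (l.getD i 0))).map (fun i => l.getD i 0)).prod
def pvTp (l : List Int) : Int := (((List.range l.length).filter (fun i => pvStrLen (l.getD i 0) < 4)).map (fun i => l.getD i 0)).prod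
def pvPp (l : List Int) (m : Nat) : Int := (((List.range m).filter (fun i => pvStrLen (l.getD i 0) < 4)).map (fun i => l.getD i 0)).prod
def pvTail (l : List Int) : List Int := (pvBigs l).map (fun i => pvPp l i * l.getD i 0)

theorem pv_split_fold (p : Nat → Prop) [DecidablePred p] (l : List Nat) (a b : List Nat) :
    l.foldl (fun (st : List Nat × List Nat) i =>
      if p i then (st.1 ++ [i], st.2) else (st.1, st.2 ++ [i])) (a, b)
    = (a ++ l.filter (fun i => decide (p i)), b ++ l.filter (fun i => decide (¬ p i))) := by
  induction l generalizing a b with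
  | nil => simp
  | cons x xs ih =>
      by_cases h : p x <;> simp [h, ih]

theorem pv_mul_fold {α : Type} (f : α → Int) (l : List α) (c : Int) :
    l.foldl (fun c x => c * f x) c = c * (l.map f).prod := by
  induction l generalizing c with
  | nil => simp
  | cons x xs ih => simp [ih, mul_assoc]

theorem pv_cond_mul_fold {α : Type} (p : α → Prop) [DecidablePred p] (f : α → Int) (l : List α) (c : Int) :
    l.foldl (fun c x => if p x then c * f x else c) c
    = c * ((l.filter (fun x => decide (p x))).map f).prod := by
  induction l generalizing c with
  | nil => simp
  | cons x xs ih =>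
      by_cases h : p x <;> simp [h, ih, mul_assoc]

theorem pv_app_fold {α β : Type} (f : α → β) (l : List α) (acc : List β) :
    l.foldl (fun acc x => acc ++ [f x]) acc = acc ++ l.map f := by
  induction l generalizing acc with
  | nil => simp
  | cons x xs ih => simp [ih]

theorem pv_getD_append (l : List Int) (x : Int) (j : Nat) (h : j < l.length) :
    (l ++ [x]).getD j 0 = l.getD j 0 := by
  simp [List.getD_eq_getElem?_getD, List.getElem?_append_left h]

theorem pv_getD_append_self (l : List Int) (x : Int) :
    (l ++ [x]).getD l.length 0 = x := by
  simp [List.getD_eq_getElem?_getD]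

theorem pv_filter_range_append (l : List Int) (x : Int) (q : Int → Prop) [DecidablePred q] :
    (List.range l.length).filter (fun i => decide (q ((l ++ [x]).getD i 0)))
    = (List.range l.length).filter (fun i => decide (q (l.getD i 0))) := by
  apply List.filter_congr
  intro i hi
  simp only [List.mem_range] at hi
  rw [pv_getD_append l x i hi]

theorem pv_map_getD_append (l : List Int) (x : Int) (s : List Nat) (h : ∀ i ∈ s, i < l.length) :
    s.map (fun i => (l ++ [x]).getD i 0) = s.map (fun i => l.getD i 0) := by
  apply List.map_congr_left
  intro i hi
  rw [pv_getD_append l x i (h i hi)]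

theorem pv_pp_append (l : List Int) (x : Int) (m : Nat) (h : m ≤ l.length) :
    pvPp (l ++ [x]) m = pvPp l m := by
  unfold pvPp
  have h1 : (List.range m).filter (fun i => decide (pvStrLen ((l ++ [x]).getD i 0) < 4))
      = (List.range m).filter (fun i => decide (pvStrLen (l.getD i 0) < 4)) := by
    apply List.filter_congr
    intro i hi
    simp only [List.mem_range] at hi
    rw [pv_getD_append l x i (by omega)]
  rw [h1, pv_map_getD_append l x _ (by intro i hi; simp only [List.mem_filter, List.mem_range] at hi; omega)]

theorem pv_pp_len (l : List Int) (x : Int) : pvPp (l ++ [x]) l.length = pvTp l := by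
  rw [pv_pp_append l x l.length le_rfl]; rfl

theorem pv_len_append (l : List Int) (x : Int) : (l ++ [x]).length = l.length + 1 := by simp

theorem pv_sp_append (l : List Int) (x : Int) :
    pvSp (l ++ [x]) = if 4 < pvStrLen x then pvSp l else pvSp l * x := by
  unfold pvSp
  rw [pv_len_append, List.range_succ, List.filter_append,
      pv_filter_range_append l x (fun y => ¬ 4 < pvStrLen y),
      List.map_append, List.prod_append,
      pv_map_getD_append l x _ (by intro i hi; simp only [List.mem_filter, List.mem_range] at hi; omega)]
  have hgl := pv_getD_append_self l x
  by_cases h : 4 < pvStrLen x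
  · rw [if_pos h]
    have he : List.filter (fun i => decide (¬ 4 < pvStrLen ((l ++ [x]).getD i 0))) [l.length] = [] := by
      simp; omega
    rw [he]; simp
  · rw [if_neg h]
    have he : List.filter (fun i => decide (¬ 4 < pvStrLen ((l ++ [x]).getD i 0))) [l.length] = [l.length] := by
      simp; omega
    rw [he]; simp

theorem pv_tp_append (l : List Int) (x : Int) :
    pvTp (l ++ [x]) = if pvStrLen x < 4 then pvTp l * x else pvTp l := by
  unfold pvTp
  rw [pv_len_append, List.range_succ, List.filter_append,
      pv_filter_range_append l x (fun y => pvStrLen y < 4),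
      List.map_append, List.prod_append,
      pv_map_getD_append l x _ (by intro i hi; simp only [List.mem_filter, List.mem_range] at hi; omega)]
  have hgl := pv_getD_append_self l x
  by_cases h : pvStrLen x < 4
  · rw [if_pos h]
    have he : List.filter (fun i => decide (pvStrLen ((l ++ [x]).getD i 0) < 4)) [l.length] = [l.length] := by
      simp; omega
    rw [he]; simp
  · rw [if_neg h]
    have he : List.filter (fun i => decide (pvStrLen ((l ++ [x]).getD i 0) < 4)) [l.length] = [] := by
      simp; omega
    rw [he]; simp

theorem pv_bigs_append (l : List Int) (x : Int) :
    pvBigs (l ++ [x]) = pvBigs l ++ if 4 < pvStrLen x then [l.length] else [] := by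
  unfold pvBigs
  rw [pv_len_append, List.range_succ, List.filter_append,
      pv_filter_range_append l x (fun y => 4 < pvStrLen y)]
  have hgl := pv_getD_append_self l x
  congr 1
  by_cases h : 4 < pvStrLen x
  · rw [if_pos h]; simp; omega
  · rw [if_neg h]; simp; omega

theorem pv_tail_append (l : List Int) (x : Int) :
    pvTail (l ++ [x]) = if 4 < pvStrLen x then pvTail l ++ [pvTp l * x] else pvTail l := by
  unfold pvTail
  rw [pv_bigs_append]
  have hmem : ∀ i ∈ pvBigs l, i < l.length := by
    intro i hi
    simp only [pvBigs, List.mem_filter, List.mem_range] at hi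
    exact hi.1
  have hmap : (pvBigs l).map (fun i => pvPp (l ++ [x]) i * (l ++ [x]).getD i 0)
      = (pvBigs l).map (fun i => pvPp l i * l.getD i 0) := by
    apply List.map_congr_left
    intro i hi
    rw [pv_pp_append l x i (le_of_lt (hmem i hi)), pv_getD_append l x i (hmem i hi)]
  by_cases h : 4 < pvStrLen x
  · simp only [if_pos h, List.map_append, hmap]
    congr 1
    simp only [List.map_cons, List.map_nil]
    rw [pv_pp_len, pv_getD_append_self]
  · simp only [if_neg h, List.append_nil, hmap]

-- B's fold computes (sp, tiny-prefix-product, tail) in closed form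
theorem pv_B_fold (l : List Int) :
    l.foldl pvStepB (1, 1, []) = (pvSp l, pvTp l, pvTail l) := by
  induction l using List.reverseRecOn with
  | nil => simp [pvSp, pvTp, pvTail, pvBigs]
  | append_singleton l x ih =>
      rw [List.foldl_append, ih]
      simp only [List.foldl_cons, List.foldl_nil]
      unfold pvStepB
      rw [pv_sp_append, pv_tp_append, pv_tail_append]
      by_cases h1 : 4 < pvStrLen x <;> by_cases h2 : pvStrLen x < 4 <;>
        first
        | (exfalso; omega)
        | simp [h1, h2]

theorem comp_coeff_eq (l1 l2 : List Int) :
    comp_coeff l1 l2 = (l1, pvSp l2 :: pvTail l2) := by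
  unfold comp_coeff
  simp only [pv_split_fold, pv_mul_fold, pv_app_fold, pv_cond_mul_fold,
    List.nil_append, one_mul, List.singleton_append]
  unfold pvSp pvTail pvBigs pvPp
  simp

-- ===== VERDICT (by name: the statement is the Claim_ definition above) =====
theorem comp_coeff_spec : Claim_equal_comp_coeff := by
  intro l1 l2 _
  unfold Spec_comp_coeff comp_coeff_alt
  rw [pv_B_fold, comp_coeff_eq]
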